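-- pv_equiv track=rewrite | github.com/benbendaisy/CommunicationCodes | python_module/test/test_arith_sub_array.py | arith_subarray_sum
-- ===== SOURCE A (Python) =====
-- def arith_subarray_sum(nums: list[int]) -> int:
--     assert len(nums) > 0, "the input should be not empty"
--     total_sum, pre_sum, cur_diff, new_diff = 0, 0, None, None
--     n, length = len(nums), 0
--     for i in range(n):
--         if i == 0:
--             pre_sum = nums[i]
--             length = 1
--         else:
--             new_diff = nums[i] - nums[i - 1]
--             if abs(new_diff) == 1:
--                 if new_diff == cur_diff:
--                     length += 1
--                     pre_sum = length * nums[i] + pre_sum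
--                 else:
--                     length = 2
--                     cur_diff = new_diff
--                     pre_sum = length * nums[i] + nums[i - 1]
--             else:
--                 length = 1
--                 pre_sum = nums[i]
--                 cur_diff = None
--         total_sum += pre_sum
--     return total_sum
-- ===== SOURCE B (Python) =====
-- def arith_subarray_sum(nums: list[int]) -> int:
--     assert len(nums) > 0, "the input should be not empty"
--     total = 0
--     for r in range(len(nums)):
--         window_sum = nums[r]
--         total += window_sum
--         if r == 0:
--             continue
--         d = nums[r] - nums[r - 1]
--         if abs(d) != 1:
--             continue
--         j = r
--         while j > 0 and nums[j] - nums[j - 1] == d: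
--             j -= 1
--             window_sum += nums[j]
--             total += window_sum
--     return total
-- ===== Notes on version B (the rewrite author's own statement) =====
-- stated objective: simpler
-- what changed: Replaces A's incremental DP (carrying pre_sum, cur_diff, length across the scan) by a plain nested scan: for each end index it walks left while the +-1 difference stays constant, adding every window sum; no carried state between ends.
import Mathlib
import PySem

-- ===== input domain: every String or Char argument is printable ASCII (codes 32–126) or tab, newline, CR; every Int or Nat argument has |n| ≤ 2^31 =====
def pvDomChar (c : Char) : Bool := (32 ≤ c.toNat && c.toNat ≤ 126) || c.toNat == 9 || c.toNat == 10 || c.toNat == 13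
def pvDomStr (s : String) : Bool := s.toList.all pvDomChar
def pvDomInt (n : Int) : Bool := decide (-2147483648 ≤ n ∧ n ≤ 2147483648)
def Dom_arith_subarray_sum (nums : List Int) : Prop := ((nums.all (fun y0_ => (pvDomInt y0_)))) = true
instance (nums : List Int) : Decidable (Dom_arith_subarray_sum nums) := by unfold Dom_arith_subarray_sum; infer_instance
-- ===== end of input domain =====

-- B replaces A's incremental O(n) DP by a plainer nested scan: for each end index it
-- walks left while the ±1 difference stays constant, summing every window sum (objective: simpler).

-- ===== PORT A =====
-- state: (total_sum, pre_sum, cur_diff, length)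
def aStep (nums : List Int) (s : Int × Int × Option Int × Int) (i : Nat) : Int × Int × Option Int × Int :=
  if i = 0 then
    (s.1 + nums.getD 0 0, nums.getD 0 0, s.2.2.1, 1)
  else
    let nd := nums.getD i 0 - nums.getD (i - 1) 0
    if |nd| = 1 then
      if s.2.2.1 = some nd then
        (s.1 + ((s.2.2.2 + 1) * nums.getD i 0 + s.2.1),
         (s.2.2.2 + 1) * nums.getD i 0 + s.2.1, s.2.2.1, s.2.2.2 + 1)
      else
        (s.1 + (2 * nums.getD i 0 + nums.getD (i - 1) 0),
         2 * nums.getD i 0 + nums.getD (i - 1) 0, some nd, 2)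
    else
      (s.1 + nums.getD i 0, nums.getD i 0, none, 1)

def arith_subarray_sum (nums : List Int) : Int :=
  ((List.range nums.length).foldl (aStep nums) (0, 0, none, 0)).1

-- ===== PORT B =====
-- the while loop 'while j > 0 and nums[j]-nums[j-1]==d', returning the total it adds
def bInner (nums : List Int) (d : Int) : Nat → Int → Int
  | 0, _ => 0
  | j + 1, w =>
    if nums.getD (j + 1) 0 - nums.getD j 0 = d then
      (w + nums.getD j 0) + bInner nums d j (w + nums.getD j 0)
    else 0

def bStep (nums : List Int) (total : Int) (r : Nat) : Int :=
  let w := nums.getD r 0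
  let total := total + w
  if r = 0 then total
  else
    let d := nums.getD r 0 - nums.getD (r - 1) 0
    if |d| = 1 then total + bInner nums d r w else total

def arith_subarray_sum_alt (nums : List Int) : Int :=
  (List.range nums.length).foldl (bStep nums) 0

-- ===== PRECONDITION & SPEC =====
-- Python A asserts len(nums) > 0 (AssertionError on []): Pre_ excludes the empty list.
def Pre_arith_subarray_sum (nums : List Int) : Prop := nums ≠ []
instance (nums : List Int) : Decidable (Pre_arith_subarray_sum nums) := by
  unfold Pre_arith_subarray_sum; infer_instance

def pvWitness_arith_subarray_sum : List Int := [1, 2]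

def Spec_arith_subarray_sum (nums : List Int) (out : Int) : Prop := out = arith_subarray_sum_alt nums
instance (nums : List Int) (out : Int) : Decidable (Spec_arith_subarray_sum nums out) := by
  unfold Spec_arith_subarray_sum; infer_instance

-- ===== CLAIM (what is proved, stated in full; the proofs are below) =====
def Claim_equal_arith_subarray_sum : Prop := ∀ (nums : List Int), Dom_arith_subarray_sum nums → Pre_arith_subarray_sum nums → Spec_arith_subarray_sum nums (arith_subarray_sum nums)

-- ===== LEMMAS AND PROOFS =====

-- the difference nums[i] - nums[i-1]
def dAt (nums : List Int) (i : Nat) : Int := nums.getD i 0 - nums.getD (i - 1) 0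

-- number of iterations of B's while loop
def stepsB (nums : List Int) (d : Int) : Nat → Int
  | 0 => 0
  | j + 1 => if nums.getD (j + 1) 0 - nums.getD j 0 = d then 1 + stepsB nums d j else 0

-- A's pre_sum / cur_diff / length after processing index i, in closed form
def preSpec (nums : List Int) (i : Nat) : Int :=
  if i ≠ 0 ∧ |dAt nums i| = 1 then nums.getD i 0 + bInner nums (dAt nums i) i (nums.getD i 0)
  else nums.getD i 0

def curSpec (nums : List Int) (i : Nat) : Option Int :=
  if i ≠ 0 ∧ |dAt nums i| = 1 then some (dAt nums i) else none

def lenSpec (nums : List Int) (i : Nat) : Int :=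
  if i ≠ 0 ∧ |dAt nums i| = 1 then 1 + stepsB nums (dAt nums i) i else 1

theorem bInner_succ (nums : List Int) (d : Int) (j : Nat) (w : Int) :
    bInner nums d (j + 1) w =
      if nums.getD (j + 1) 0 - nums.getD j 0 = d then
        (w + nums.getD j 0) + bInner nums d j (w + nums.getD j 0)
      else 0 := rfl

theorem stepsB_succ (nums : List Int) (d : Int) (j : Nat) :
    stepsB nums d (j + 1) =
      if nums.getD (j + 1) 0 - nums.getD j 0 = d then 1 + stepsB nums d j else 0 := rfl

theorem bInner_shift (nums : List Int) (d : Int) :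
    ∀ (j : Nat) (w c : Int), bInner nums d j (w + c) = bInner nums d j w + c * stepsB nums d j := by
  intro j
  induction j with
  | zero => intro w c; simp [bInner, stepsB]
  | succ j ih =>
    intro w c
    rw [bInner_succ, bInner_succ, stepsB_succ]
    split_ifs with h
    · rw [show w + c + nums.getD j 0 = (w + nums.getD j 0) + c by ring, ih]
      ring
    · ring

theorem bStep_eq_preSpec (nums : List Int) (total : Int) (r : Nat) :
    bStep nums total r = total + preSpec nums r := by
  unfold bStep preSpec dAt
  by_cases h0 : r = 0
  · subst h0
    simp
  · rw [if_neg h0]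
    by_cases h1 : |nums.getD r 0 - nums.getD (r - 1) 0| = 1
    · rw [if_pos h1, if_pos ⟨h0, h1⟩]; ring
    · rw [if_neg h1, if_neg (by intro h; exact h1 h.2)]

theorem afold_inv (nums : List Int) :
    ∀ m : Nat, (List.range (m + 1)).foldl (aStep nums) (0, 0, none, 0) =
      ((List.range (m + 1)).foldl (bStep nums) 0, preSpec nums m, curSpec nums m, lenSpec nums m) := by
  intro m
  induction m with
  | zero =>
    simp [List.range_succ, aStep, bStep, preSpec, curSpec, lenSpec, dAt]
  | succ m ih =>
    rw [List.range_succ, List.foldl_append, List.foldl_append, ih]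
    simp only [List.foldl_cons, List.foldl_nil]
    rw [bStep_eq_preSpec]
    have hne : (m + 1 : Nat) ≠ 0 := Nat.succ_ne_zero m
    simp only [aStep, Nat.add_sub_cancel]
    rw [if_neg hne]
    have hdAt : dAt nums (m + 1) = nums.getD (m + 1) 0 - nums.getD m 0 := by
      unfold dAt; rw [Nat.add_sub_cancel]
    by_cases habs : |nums.getD (m + 1) 0 - nums.getD m 0| = 1
    · -- the new difference is ±1
      rw [if_pos habs]
      have hcond : (m + 1 : Nat) ≠ 0 ∧ |dAt nums (m + 1)| = 1 := ⟨hne, by rw [hdAt]; exact habs⟩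
      have hbi : bInner nums (nums.getD (m + 1) 0 - nums.getD m 0) (m + 1) (nums.getD (m + 1) 0) =
          (nums.getD (m + 1) 0 + nums.getD m 0) +
            bInner nums (nums.getD (m + 1) 0 - nums.getD m 0) m
              (nums.getD (m + 1) 0 + nums.getD m 0) := by
        rw [bInner_succ, if_pos rfl]
      have hst : stepsB nums (nums.getD (m + 1) 0 - nums.getD m 0) (m + 1) =
          1 + stepsB nums (nums.getD (m + 1) 0 - nums.getD m 0) m := by
        rw [stepsB_succ, if_pos rfl]
      have hpre1 : preSpec nums (m + 1) = nums.getD (m + 1) 0 +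
          ((nums.getD (m + 1) 0 + nums.getD m 0) +
            bInner nums (nums.getD (m + 1) 0 - nums.getD m 0) m
              (nums.getD (m + 1) 0 + nums.getD m 0)) := by
        rw [preSpec, if_pos hcond, hdAt, hbi]
      have hcur1 : curSpec nums (m + 1) = some (nums.getD (m + 1) 0 - nums.getD m 0) := by
        rw [curSpec, if_pos hcond, hdAt]
      have hlen1 : lenSpec nums (m + 1) =
          1 + stepsB nums (nums.getD (m + 1) 0 - nums.getD m 0) (m + 1) := by
        rw [lenSpec, if_pos hcond, hdAt]
      by_cases hcur : curSpec nums m = some (nums.getD (m + 1) 0 - nums.getD m 0)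
      · -- same difference as the current run: A extends it
        rw [if_pos hcur]
        have hm : m ≠ 0 ∧ |dAt nums m| = 1 := by
          by_contra hc
          rw [curSpec, if_neg hc] at hcur
          exact absurd hcur (by simp)
        have hdm : dAt nums m = nums.getD (m + 1) 0 - nums.getD m 0 := by
          rw [curSpec, if_pos hm] at hcur
          exact Option.some.inj hcur
        have hpm : preSpec nums m = nums.getD m 0 +
            bInner nums (nums.getD (m + 1) 0 - nums.getD m 0) m (nums.getD m 0) := by
          rw [preSpec, if_pos hm, hdm]
        have hlm : lenSpec nums m =
            1 + stepsB nums (nums.getD (m + 1) 0 - nums.getD m 0) m := by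
          rw [lenSpec, if_pos hm, hdm]
        have hshift : bInner nums (nums.getD (m + 1) 0 - nums.getD m 0) m
              (nums.getD (m + 1) 0 + nums.getD m 0) =
            bInner nums (nums.getD (m + 1) 0 - nums.getD m 0) m (nums.getD m 0) +
              nums.getD (m + 1) 0 * stepsB nums (nums.getD (m + 1) 0 - nums.getD m 0) m := by
          rw [show nums.getD (m + 1) 0 + nums.getD m 0 =
              nums.getD m 0 + nums.getD (m + 1) 0 by ring, bInner_shift]
        simp only [Prod.mk.injEq]
        refine ⟨?_, ?_, ?_, ?_⟩
        · rw [hpre1, hshift, hpm, hlm]; ring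
        · rw [hpre1, hshift, hpm, hlm]; ring
        · rw [hcur, hcur1]
        · rw [hlm, hlen1, hst]; ring
      · -- run broken: A restarts with length 2, and B's backward walk from m stops at once
        rw [if_neg hcur]
        have hbz : bInner nums (nums.getD (m + 1) 0 - nums.getD m 0) m
              (nums.getD (m + 1) 0 + nums.getD m 0) = 0 ∧
            stepsB nums (nums.getD (m + 1) 0 - nums.getD m 0) m = 0 := by
          cases m with
          | zero => exact ⟨rfl, rfl⟩
          | succ j =>
            have hdm : dAt nums (j + 1) ≠ nums.getD (j + 2) 0 - nums.getD (j + 1) 0 := by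
              intro hEq
              apply hcur
              rw [curSpec, if_pos ⟨Nat.succ_ne_zero j, by rw [hEq]; exact habs⟩, hEq]
            have hne' : nums.getD (j + 1) 0 - nums.getD j 0 ≠
                nums.getD (j + 2) 0 - nums.getD (j + 1) 0 := by
              intro hc; exact hdm (by rw [dAt, Nat.add_sub_cancel, hc])
            exact ⟨by rw [bInner_succ, if_neg hne'], by rw [stepsB_succ, if_neg hne']⟩
        simp only [Prod.mk.injEq]
        refine ⟨?_, ?_, ?_, ?_⟩
        · rw [hpre1, hbz.1]; ring
        · rw [hpre1, hbz.1]; ring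
        · rw [hcur1]
        · rw [hlen1, hst, hbz.2]; ring
    · -- |nd| ≠ 1: both restart from a singleton
      rw [if_neg habs]
      have hc : ¬ ((m + 1 : Nat) ≠ 0 ∧ |dAt nums (m + 1)| = 1) := by
        intro h; exact habs (by rw [← hdAt]; exact h.2)
      simp only [Prod.mk.injEq]
      exact ⟨by rw [preSpec, if_neg hc], by rw [preSpec, if_neg hc],
        by rw [curSpec, if_neg hc], by rw [lenSpec, if_neg hc]⟩

-- ===== VERDICT (by name: the statement is the Claim_ definition above) =====
theorem arith_subarray_sum_spec : Claim_equal_arith_subarray_sum := by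
  intro nums _ hpre
  unfold Spec_arith_subarray_sum arith_subarray_sum arith_subarray_sum_alt
  cases hn : nums.length with
  | zero => exact absurd (List.length_eq_zero_iff.mp hn) hpre
  | succ m =>
    rw [afold_inv nums m]
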